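-- pv_equiv track=rewrite | github.com/samlayton99/sparse_flappy | archive/prepare_data.py | pack_tokens
-- ===== SOURCE A (Python) =====
-- from typing import Iterator, List
--
-- SEQ_LEN = 513  # Total sequence length including EOS
--
-- EOS_TOKEN_ID = 50256  # GPT-2 <|endoftext|>
--
-- PAD_TOKEN_ID = 50256  # Use EOS as pad (standard practice for GPT-2)
--
-- def pack_tokens(
--     token_stream: Iterator[List[int]],
--     seq_len: int = SEQ_LEN,
-- ) -> Iterator[dict]:
--     """Pack tokens into fixed-length sequences.
--
--     Concatenates documents with EOS separators, then chunks into seq_len sequences.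
--     Each sequence ends with EOS and is padded if needed.
--
--     Yields:
--         dict with 'input_ids' and 'pad_mask'
--     """
--     buffer = []
--
--     for tokens in token_stream:
--         # Add document tokens + EOS separator
--         buffer.extend(tokens)
--         buffer.append(EOS_TOKEN_ID)
--
--         # Yield complete sequences
--         while len(buffer) >= seq_len:
--             seq_tokens = buffer[:seq_len]
--             buffer = buffer[seq_len:]
--
--             yield {
--                 "input_ids": seq_tokens,
--                 "pad_mask": [1] * seq_len,  # All real tokens
--             }
--
--     # Handle remaining tokens (pad the last sequence)
--     if buffer:
--         pad_len = seq_len - len(buffer)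
--         yield {
--             "input_ids": buffer + [PAD_TOKEN_ID] * pad_len,
--             "pad_mask": [1] * len(buffer) + [0] * pad_len,
--         }
-- ===== SOURCE B (Python) =====
-- from typing import Iterator, List
--
-- SEQ_LEN = 513
-- EOS_TOKEN_ID = 50256
-- PAD_TOKEN_ID = 50256
--
-- def pack_tokens(
--     token_stream: Iterator[List[int]],
--     seq_len: int = SEQ_LEN,
-- ) -> Iterator[dict]:
--     """Flatten documents (each followed by EOS) into one token stream,
--     then chunk it token-by-token into seq_len sequences, padding the tail."""
--     def flat():
--         for doc in token_stream:
--             yield from doc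
--             yield EOS_TOKEN_ID
--
--     current = []
--     for tok in flat():
--         current.append(tok)
--         if len(current) == seq_len:
--             yield {"input_ids": current, "pad_mask": [1] * seq_len}
--             current = []
--     if current:
--         pad = seq_len - len(current)
--         yield {"input_ids": current + [PAD_TOKEN_ID] * pad,
--                "pad_mask": [1] * len(current) + [0] * pad}
-- ===== Notes on version B (the rewrite author's own statement) =====
-- stated objective: simpler
-- what changed: Replaces the per-document buffer-extend plus while-loop slice-drain with a flatten-then-chunk pass: an inner generator yields every token followed by EOS, and a single loop appends tokens to the current chunk, emitting it whenever it reaches seq_len, padding the tail.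
import Mathlib
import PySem

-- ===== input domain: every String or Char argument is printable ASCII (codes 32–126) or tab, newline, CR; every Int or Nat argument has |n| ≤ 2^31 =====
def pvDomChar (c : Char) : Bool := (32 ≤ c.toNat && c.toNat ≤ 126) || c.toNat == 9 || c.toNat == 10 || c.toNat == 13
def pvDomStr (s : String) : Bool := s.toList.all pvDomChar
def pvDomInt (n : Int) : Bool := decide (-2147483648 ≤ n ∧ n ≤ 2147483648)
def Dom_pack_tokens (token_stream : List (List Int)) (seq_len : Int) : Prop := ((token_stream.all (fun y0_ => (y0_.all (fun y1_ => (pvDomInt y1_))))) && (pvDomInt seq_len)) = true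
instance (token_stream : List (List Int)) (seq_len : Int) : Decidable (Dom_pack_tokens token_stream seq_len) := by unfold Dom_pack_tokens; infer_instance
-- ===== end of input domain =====

-- B replaces A's per-document buffer-extend + while-loop slice-drain by a single
-- flatten-then-chunk pass (simpler decomposition); return value only, no mutation.

def pvEOS : Int := 50256
def pvPAD : Int := 50256

-- ===== PORT A =====
-- the 'while len(buffer) >= seq_len' drain; fuel = buffer length (enough whenever
-- seq_len ≥ 1, i.e. on Pre_; Python loops forever for seq_len ≤ 0 with a nonempty buffer)
def packDrainA : Nat → List Int → Int → (List (List (String × List Int)) × List Int)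
  | 0, buffer, _ => ([], buffer)
  | f + 1, buffer, seq_len =>
    if (buffer.length : Int) ≥ seq_len then
      let seq_tokens := PySem.List.slice buffer none (some seq_len)
      let buffer' := PySem.List.slice buffer (some seq_len) none
      let r := packDrainA f buffer' seq_len
      ([("input_ids", seq_tokens),
        ("pad_mask", List.replicate seq_len.toNat (1 : Int))] :: r.1, r.2)
    else ([], buffer)

-- the 'for tokens in token_stream' loop carrying the buffer, then the tail padding
def packLoopA : List (List Int) → List Int → Int → List (List (String × List Int))
  | [], buffer, seq_len =>
    if buffer ≠ [] then
      [[("input_ids", buffer ++ List.replicate (seq_len - buffer.length).toNat pvPAD),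
        ("pad_mask", List.replicate buffer.length (1 : Int) ++
                     List.replicate (seq_len - buffer.length).toNat (0 : Int))]]
    else []
  | tokens :: rest, buffer, seq_len =>
    let buffer1 := buffer ++ tokens ++ [pvEOS]
    let r := packDrainA buffer1.length buffer1 seq_len
    r.1 ++ packLoopA rest r.2 seq_len

def pack_tokens (token_stream : List (List Int)) (seq_len : Int) : List (List (String × List Int)) :=
  packLoopA token_stream [] seq_len

-- ===== PORT B =====
-- the inner generator: each document's tokens followed by EOS
def flatStreamB : List (List Int) → List Int
  | [] => []
  | doc :: rest => doc ++ pvEOS :: flatStreamB rest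

-- the chunker: append token by token, emit when the chunk reaches seq_len, pad the tail
def chunkB : List Int → List Int → Int → List (List (String × List Int))
  | [], current, seq_len =>
    if current ≠ [] then
      [[("input_ids", current ++ List.replicate (seq_len - current.length).toNat pvPAD),
        ("pad_mask", List.replicate current.length (1 : Int) ++
                     List.replicate (seq_len - current.length).toNat (0 : Int))]]
    else []
  | t :: rest, current, seq_len =>
    let cur := current ++ [t]
    if (cur.length : Int) = seq_len then
      [("input_ids", cur), ("pad_mask", List.replicate seq_len.toNat (1 : Int))]
        :: chunkB rest [] seq_len
    else chunkB rest cur seq_len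

def pack_tokens_alt (token_stream : List (List Int)) (seq_len : Int) : List (List (String × List Int)) :=
  chunkB (flatStreamB token_stream) [] seq_len

-- ===== PRECONDITION & SPEC =====
-- Pre_ excludes seq_len ≤ 0 with a nonempty stream: there Python A's while-loop never
-- terminates (the buffer never shrinks below seq_len), so A returns no value.
def Pre_pack_tokens (token_stream : List (List Int)) (seq_len : Int) : Prop :=
  1 ≤ seq_len ∨ token_stream = []
instance (token_stream : List (List Int)) (seq_len : Int) : Decidable (Pre_pack_tokens token_stream seq_len) := by unfold Pre_pack_tokens; infer_instance
def pvWitness_pack_tokens : List (List Int) × Int := ([[1, 2, 3], [4]], 3)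

def Spec_pack_tokens (token_stream : List (List Int)) (seq_len : Int) (out : List (List (String × List Int))) : Prop := out = pack_tokens_alt token_stream seq_len
instance (token_stream : List (List Int)) (seq_len : Int) (out : List (List (String × List Int))) : Decidable (Spec_pack_tokens token_stream seq_len out) := by unfold Spec_pack_tokens; infer_instance

-- ===== CLAIM (what is proved, stated in full; the proofs are below) =====
def Claim_equal_pack_tokens : Prop := ∀ (token_stream : List (List Int)) (seq_len : Int), Dom_pack_tokens token_stream seq_len → Pre_pack_tokens token_stream seq_len → Spec_pack_tokens token_stream seq_len (pack_tokens token_stream seq_len)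

-- ===== LEMMAS AND PROOFS =====

-- canonical form: chunk the flat token list into seq_len pieces, pad the tail
def packCanon (flat : List Int) (seq_len : Int) : List (List (String × List Int)) :=
  if flat = [] then []
  else if _h : 1 ≤ seq_len ∧ seq_len ≤ (flat.length : Int) then
    [("input_ids", flat.take seq_len.toNat),
     ("pad_mask", List.replicate seq_len.toNat (1 : Int))]
      :: packCanon (flat.drop seq_len.toNat) seq_len
  else
    [[("input_ids", flat ++ List.replicate (seq_len - flat.length).toNat pvPAD),
      ("pad_mask", List.replicate flat.length (1 : Int) ++
                   List.replicate (seq_len - flat.length).toNat (0 : Int))]]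
termination_by flat.length
decreasing_by
  simp only [List.length_drop]
  omega

-- a short (length < seq_len) nonempty list is a single padded tail chunk
theorem packCanon_tail (flat : List Int) (seq_len : Int) (hne : flat ≠ [])
    (hlt : flat.length < seq_len.toNat) :
    packCanon flat seq_len =
      [[("input_ids", flat ++ List.replicate (seq_len - flat.length).toNat pvPAD),
        ("pad_mask", List.replicate flat.length (1 : Int) ++
                     List.replicate (seq_len - flat.length).toNat (0 : Int))]] := by
  rw [packCanon]
  have hcond : ¬ (1 ≤ seq_len ∧ seq_len ≤ (flat.length : Int)) := by
    intro ⟨h1, h2⟩; omega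
  simp [hne, hcond]

-- a long (length ≥ seq_len ≥ 1) list starts with a full chunk
theorem packCanon_step (flat : List Int) (seq_len : Int) (hn : 1 ≤ seq_len)
    (hge : seq_len ≤ (flat.length : Int)) :
    packCanon flat seq_len =
      [("input_ids", flat.take seq_len.toNat),
       ("pad_mask", List.replicate seq_len.toNat (1 : Int))]
        :: packCanon (flat.drop seq_len.toNat) seq_len := by
  have hne : flat ≠ [] := by
    intro h; subst h; simp at hge; omega
  rw [packCanon]
  simp [hne, And.intro hn hge]

theorem packDrainA_spec (seq_len : Int) (hn : 1 ≤ seq_len) :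
    ∀ (f : Nat) (b : List Int), b.length ≤ f →
      (packDrainA f b seq_len).2.length < seq_len.toNat ∧
      ∀ s : List Int, packCanon (b ++ s) seq_len =
        (packDrainA f b seq_len).1 ++ packCanon ((packDrainA f b seq_len).2 ++ s) seq_len := by
  intro f
  induction f with
  | zero =>
    intro b hb
    constructor
    · simp [packDrainA]; omega
    · intro s; simp [packDrainA]
  | succ f ih =>
    intro b hb
    by_cases hge : (b.length : Int) ≥ seq_len
    · have h0 : (0 : Int) ≤ seq_len := by omega
      have hslice1 : PySem.List.slice b none (some seq_len) = b.take seq_len.toNat :=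
        PySem.List.slice_to b h0
      have hslice2 : PySem.List.slice b (some seq_len) none = b.drop seq_len.toNat :=
        PySem.List.slice_from b h0
      have hlen : (b.drop seq_len.toNat).length ≤ f := by
        have := List.length_drop (l := b) (i := seq_len.toNat)
        omega
      obtain ⟨ih1, ih2⟩ := ih (b.drop seq_len.toNat) hlen
      constructor
      · simpa [packDrainA, hge, hslice1, hslice2] using ih1
      · intro s
        have hge' : seq_len ≤ ((b ++ s).length : Int) := by simp; omega
        rw [packCanon_step (b ++ s) seq_len hn hge']
        have htake : (b ++ s).take seq_len.toNat = b.take seq_len.toNat :=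
          List.take_append_of_le_length (by omega)
        have hdrop : (b ++ s).drop seq_len.toNat = b.drop seq_len.toNat ++ s :=
          List.drop_append_of_le_length (by omega)
        rw [htake, hdrop, ih2 s]
        simp [packDrainA, hge, hslice1, hslice2]
    · constructor
      · simp [packDrainA, hge]; omega
      · intro s; simp [packDrainA, hge]

theorem chunkB_spec (seq_len : Int) (hn : 1 ≤ seq_len) :
    ∀ (flat cur : List Int), cur.length < seq_len.toNat →
      chunkB flat cur seq_len = packCanon (cur ++ flat) seq_len := by
  intro flat
  induction flat with
  | nil =>
    intro cur hcur
    by_cases hc : cur = []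
    · subst hc; simp [chunkB, packCanon]
    · rw [List.append_nil, packCanon_tail cur seq_len hc hcur]
      simp [chunkB, hc]
  | cons t rest ih =>
    intro cur hcur
    by_cases heq : ((cur ++ [t]).length : Int) = seq_len
    · have hlen1 : cur.length + 1 = seq_len.toNat := by simp at heq; omega
      rw [show cur ++ t :: rest = (cur ++ [t]) ++ rest by simp,
          packCanon_step ((cur ++ [t]) ++ rest) seq_len hn
            (by rw [List.length_append]; push_cast; omega)]
      have hfull : seq_len.toNat = (cur ++ [t]).length := by simp; omega
      rw [hfull, List.take_left, List.drop_left]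
      simp only [chunkB, if_pos heq]
      rw [ih [] (by simp; omega)]
      simp [hfull]
    · have hlt : (cur ++ [t]).length < seq_len.toNat := by
        simp at heq ⊢; omega
      simp only [chunkB, if_neg heq]
      rw [ih (cur ++ [t]) hlt]
      simp

theorem packLoopA_spec (seq_len : Int) (hn : 1 ≤ seq_len) :
    ∀ (ts : List (List Int)) (buffer : List Int), buffer.length < seq_len.toNat →
      packLoopA ts buffer seq_len = packCanon (buffer ++ flatStreamB ts) seq_len := by
  intro ts
  induction ts with
  | nil =>
    intro buffer hb
    by_cases hc : buffer = []
    · subst hc; simp [packLoopA, flatStreamB, packCanon]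
    · rw [show flatStreamB [] = ([] : List Int) from rfl, List.append_nil,
          packCanon_tail buffer seq_len hc hb]
      simp [packLoopA, hc]
  | cons doc rest ih =>
    intro buffer hb
    obtain ⟨h1, h2⟩ := packDrainA_spec seq_len hn (buffer ++ doc ++ [pvEOS]).length
      (buffer ++ doc ++ [pvEOS]) le_rfl
    show (packDrainA (buffer ++ doc ++ [pvEOS]).length (buffer ++ doc ++ [pvEOS]) seq_len).1 ++
        packLoopA rest (packDrainA (buffer ++ doc ++ [pvEOS]).length (buffer ++ doc ++ [pvEOS]) seq_len).2 seq_len = _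
    rw [ih _ h1, ← h2 (flatStreamB rest)]
    simp [flatStreamB]

-- ===== VERDICT (by name: the statement is the Claim_ definition above) =====
theorem pack_tokens_spec : Claim_equal_pack_tokens := by
  intro ts seq_len _ hpre
  unfold Spec_pack_tokens pack_tokens pack_tokens_alt
  rcases hpre with hn | hempty
  · rw [packLoopA_spec seq_len hn ts [] (by simp; omega),
        chunkB_spec seq_len hn (flatStreamB ts) [] (by simp; omega)]
  · subst hempty; simp [packLoopA, flatStreamB, chunkB]
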